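-- pv_equiv track=rewrite | github.com/uzl/Bangla_Number_to_Word | Python_Code/bangla_number_to_word.py | make_cycle_list
-- ===== SOURCE A (Python) =====
-- def make_cycle_list(digit):
--     digit_len = len(digit)
--     full_cycle = digit_len // 7
--     partial_cycle = digit_len % 7
--
--     cycle_list = []
--     for i in range(full_cycle):
--         start = digit_len - 7 * (i + 1)
--         end = digit_len - 7 * i
--         sub_data = digit[start: end]
--         cycle_list.append(sub_data)
--
--     start = digit_len - 7 * full_cycle - partial_cycle
--     end = digit_len - 7 * full_cycle
--     if start != end:
--         cycle_list.append(digit[start:end])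
--
--     return cycle_list
-- ===== SOURCE B (Python) =====
-- def make_cycle_list(digit):
--     partial = len(digit) % 7
--     chunks = []
--     if partial:
--         chunks.append(digit[:partial])
--     for i in range(partial, len(digit), 7):
--         chunks.append(digit[i:i + 7])
--     chunks.reverse()
--     return chunks
-- ===== Notes on version B (the rewrite author's own statement) =====
-- stated objective: alternative
-- what changed: B traverses the string left-to-right (partial prefix first, then 7-char chunks by a step-7 range) and reverses the result, instead of A's counted right-to-left index arithmetic with a trailing partial-chunk special case.
import Mathlib
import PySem

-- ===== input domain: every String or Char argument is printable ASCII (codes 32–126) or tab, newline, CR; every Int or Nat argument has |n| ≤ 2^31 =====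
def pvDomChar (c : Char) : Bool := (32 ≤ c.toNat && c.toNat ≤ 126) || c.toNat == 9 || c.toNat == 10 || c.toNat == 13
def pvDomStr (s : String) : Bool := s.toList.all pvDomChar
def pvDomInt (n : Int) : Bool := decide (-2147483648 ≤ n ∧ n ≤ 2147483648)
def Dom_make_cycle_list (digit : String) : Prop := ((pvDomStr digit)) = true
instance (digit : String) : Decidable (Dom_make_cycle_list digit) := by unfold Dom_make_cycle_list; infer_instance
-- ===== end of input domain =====

-- B splits the string into 7-char chunks left-to-right and reverses at the end,
-- replacing A's right-to-left counted loop plus partial-chunk special case (objective: alternative).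
-- String slices/length are ported on .toList with PySem.List.slice, exact for Python string slicing.

-- ===== PORT A =====
def make_cycle_list (digit : String) : List String :=
  let l := digit.toList
  let digit_len : Int := l.length
  let full_cycle := PySem.Int.floordiv digit_len 7
  let partial_cycle := PySem.Int.mod digit_len 7
  let cycle_list := (PySem.List.pyRange 0 full_cycle 1).foldl
    (fun acc i =>
      acc ++ [String.ofList (PySem.List.slice l (some (digit_len - 7 * (i + 1))) (some (digit_len - 7 * i)))]) []
  let start := digit_len - 7 * full_cycle - partial_cycle
  let e := digit_len - 7 * full_cycle
  if start ≠ e then cycle_list ++ [String.ofList (PySem.List.slice l (some start) (some e))] else cycle_list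

-- ===== PORT B =====
def make_cycle_list_alt (digit : String) : List String :=
  let l := digit.toList
  let n : Int := l.length
  let p := PySem.Int.mod n 7
  let chunks0 := if p ≠ 0 then [String.ofList (PySem.List.slice l (some 0) (some p))] else []
  let chunks := (PySem.List.pyRange p n 7).foldl
    (fun acc i => acc ++ [String.ofList (PySem.List.slice l (some i) (some (i + 7)))]) chunks0
  chunks.reverse

-- ===== PRECONDITION & SPEC =====
def Spec_make_cycle_list (digit : String) (out : List String) : Prop := out = make_cycle_list_alt digit
instance (digit : String) (out : List String) : Decidable (Spec_make_cycle_list digit out) := by unfold Spec_make_cycle_list; infer_instance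

-- ===== CLAIM (what is proved, stated in full; the proofs are below) =====
def Claim_equal_make_cycle_list : Prop := ∀ (digit : String), Dom_make_cycle_list digit → Spec_make_cycle_list digit (make_cycle_list digit)

-- ===== LEMMAS AND PROOFS =====

-- a map over range equals the reverse of another map over the same range when the
-- functions agree at mirrored indices
theorem map_range_eq_reverse_map_range {β : Type} (m : Nat) (g h : Nat → β)
    (hgh : ∀ k, k < m → g k = h (m - 1 - k)) :
    (List.range m).map g = ((List.range m).map h).reverse := by
  apply List.ext_getElem
  · simp
  · intro k h1 h2
    have hk : k < m := by simpa using h1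
    simp only [List.getElem_reverse, List.length_map, List.length_range,
      List.getElem_map, List.getElem_range]
    exact hgh k hk

theorem make_cycle_list_eq (digit : String) :
    make_cycle_list digit = make_cycle_list_alt digit := by
  simp only [make_cycle_list, make_cycle_list_alt]
  set l := digit.toList with hl
  have hfloor : PySem.Int.floordiv ((l.length : Int)) 7 = ((l.length / 7 : Nat) : Int) := by
    simp [PySem.Int.floordiv, Int.fdiv_eq_ediv_of_nonneg _ (by norm_num : (0:Int) ≤ 7)]
  have hmod : PySem.Int.mod ((l.length : Int)) 7 = ((l.length % 7 : Nat) : Int) := by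
    simp [PySem.Int.mod, Int.fmod_eq_emod_of_nonneg _ (by norm_num : (0:Int) ≤ 7)]
  rw [hfloor, hmod]
  simp only [PySem.List.foldl_append_singleton_eq_map, List.nil_append]
  have hsub : (l.length : Int) - 7 * ((l.length / 7 : Nat) : Int) - ((l.length % 7 : Nat) : Int) = 0 := by
    omega
  have hsub2 : (l.length : Int) - 7 * ((l.length / 7 : Nat) : Int) = ((l.length % 7 : Nat) : Int) := by
    omega
  rw [hsub, hsub2]
  rw [PySem.List.pyRange_of_pos _ _ (by norm_num : (0:Int) < 7), PySem.List.pyRange_one]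
  have hcnt : (if ((l.length % 7 : Nat) : Int) < (l.length : Int)
      then (((l.length : Int) - ((l.length % 7 : Nat) : Int) + 7 - 1) / 7).toNat else 0)
      = l.length / 7 := by
    split_ifs <;> omega
  rw [hcnt, List.reverse_append,
      show (((l.length / 7 : Nat) : Int) - 0).toNat = l.length / 7 by omega]
  simp only [List.map_map]
  by_cases hp : ((l.length % 7 : Nat) : Int) = 0
  · rw [if_neg (by omega), if_neg (by omega), List.reverse_nil, List.append_nil]
    apply map_range_eq_reverse_map_range
    intro k hk
    dsimp only [Function.comp]
    congr 2 <;> (congr 1; omega)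
  · rw [if_pos (by omega), if_pos (by omega), List.reverse_cons, List.reverse_nil,
      List.nil_append]
    congr 1
    apply map_range_eq_reverse_map_range
    intro k hk
    dsimp only [Function.comp]
    congr 2 <;> (congr 1; omega)

theorem make_cycle_list_spec : Claim_equal_make_cycle_list := by
  intro digit _
  exact (make_cycle_list_eq digit).symm ▸ rfl
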